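-- pv_equiv track=rewrite | github.com/jdeans2217/canvas-parent-cli | scanner/matcher.py | _determine_method
-- ===== SOURCE A (Python) =====
-- from typing import Optional, List, Tuple
--
-- def _determine_method(reasons: List[str]) -> str:
--     """Determine the primary matching method from reasons."""
--     has_title = any("title" in r.lower() for r in reasons)
--     has_date = any("date" in r.lower() for r in reasons)
--
--     if has_title and has_date:
--         return "title+date"
--     elif has_title:
--         return "title"
--     elif has_date:
--         return "date"
--     else:
--         return "auto"
-- ===== SOURCE B (Python) =====
-- _METHOD_TABLE = ["auto", "title", "date", "title+date"]
--
-- def _determine_method(reasons):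
--     """Determine the primary matching method from reasons."""
--     code = 0
--     for r in reasons:
--         rl = r.lower()
--         if "title" in rl:
--             code |= 1
--         if "date" in rl:
--             code |= 2
--         if code == 3:
--             break
--     return _METHOD_TABLE[code]
-- ===== Notes on version B (the rewrite author's own statement) =====
-- stated objective: alternative
-- what changed: B makes a single pass over the reasons maintaining a 2-bit flag mask with early exit once both methods are seen, then indexes a 4-entry lookup table, replacing A's two separate any() scans and four-way if/elif.
import Mathlib
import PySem

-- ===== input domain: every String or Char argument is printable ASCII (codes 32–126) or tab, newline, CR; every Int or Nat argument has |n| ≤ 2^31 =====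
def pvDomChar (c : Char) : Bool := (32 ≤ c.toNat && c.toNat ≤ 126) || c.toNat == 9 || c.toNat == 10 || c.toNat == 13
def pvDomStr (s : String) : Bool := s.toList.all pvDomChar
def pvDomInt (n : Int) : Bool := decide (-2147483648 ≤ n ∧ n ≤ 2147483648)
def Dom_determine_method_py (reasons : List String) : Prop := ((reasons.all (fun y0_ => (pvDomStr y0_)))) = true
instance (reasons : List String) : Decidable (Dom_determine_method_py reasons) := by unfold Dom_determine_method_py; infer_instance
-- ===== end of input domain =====

-- ===== PORT A =====
-- B replaces A's two any() scans and four-way if/elif by a single pass with a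
-- 2-bit flag mask (early exit once both bits are set) and a 4-entry lookup table
-- (objective: alternative).
def determine_method_py (reasons : List String) : String :=
  let has_title := reasons.any (fun r => PySem.Str.isIn "title" (PySem.Str.lower r))
  let has_date := reasons.any (fun r => PySem.Str.isIn "date" (PySem.Str.lower r))
  if has_title && has_date then "title+date"
  else if has_title then "title"
  else if has_date then "date"
  else "auto"

-- ===== PORT B =====
def pvMethodTable : List String := ["auto", "title", "date", "title+date"]

-- the for-loop of Source B: accumulates the bitmask, `break` once code = 3
def pvAltLoop : List String → Nat → Nat
  | [], code => code
  | r :: rest, code =>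
    let rl := PySem.Str.lower r
    let code := if PySem.Str.isIn "title" rl then code ||| 1 else code
    let code := if PySem.Str.isIn "date" rl then code ||| 2 else code
    if code == 3 then code else pvAltLoop rest code

def determine_method_py_alt (reasons : List String) : String :=
  -- _METHOD_TABLE[code]; code ≤ 3 always, so the getD default is unreachable
  pvMethodTable.getD (pvAltLoop reasons 0) ""

-- ===== PRECONDITION & SPEC =====
def Spec_determine_method_py (reasons : List String) (out : String) : Prop := out = determine_method_py_alt reasons
instance (reasons : List String) (out : String) : Decidable (Spec_determine_method_py reasons out) := by unfold Spec_determine_method_py; infer_instance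

-- ===== CLAIM (what is proved, stated in full; the proofs are below) =====
def Claim_equal_determine_method_py : Prop := ∀ (reasons : List String), Dom_determine_method_py reasons → Spec_determine_method_py reasons (determine_method_py reasons)

-- ===== LEMMAS AND PROOFS =====
theorem pvAltLoop_eq (rs : List String) : ∀ c : Nat, c ≤ 3 →
    pvAltLoop rs c =
      c ||| (if rs.any (fun r => PySem.Str.isIn "title" (PySem.Str.lower r)) then 1 else 0)
        ||| (if rs.any (fun r => PySem.Str.isIn "date" (PySem.Str.lower r)) then 2 else 0) := by
  induction rs with
  | nil => intro c _; simp [pvAltLoop]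
  | cons r rs ih =>
    intro c hc
    interval_cases c <;>
      cases hb1 : PySem.Str.isIn "title" (PySem.Str.lower r) <;>
      cases hb2 : PySem.Str.isIn "date" (PySem.Str.lower r) <;>
        simp only [pvAltLoop, hb1, hb2, List.any_cons, if_true, Bool.false_or, Bool.true_or] <;>
        (try rw [ih _ (by decide)]) <;>
        cases hT : rs.any (fun r => PySem.Str.isIn "title" (PySem.Str.lower r)) <;>
        cases hD : rs.any (fun r => PySem.Str.isIn "date" (PySem.Str.lower r)) <;>
        simp [hT, hD]

-- ===== VERDICT (by name: the statement is the Claim_ definition above) =====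
theorem determine_method_py_spec : Claim_equal_determine_method_py := by
  intro reasons _
  unfold Spec_determine_method_py determine_method_py determine_method_py_alt
  rw [pvAltLoop_eq reasons 0 (by decide)]
  cases ht : reasons.any (fun r => PySem.Str.isIn "title" (PySem.Str.lower r)) <;>
    cases hd : reasons.any (fun r => PySem.Str.isIn "date" (PySem.Str.lower r)) <;>
      simp [pvMethodTable]
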